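-- pv_equiv track=rewrite | github.com/GarrettXUPT/papper | verionCon/booleanFunctionVersion2/autocorrelation.py | mulMatAndVec
-- ===== SOURCE A (Python) =====
-- def mulMatAndVec(vec, matrix):
--     resVec = []
--     len1 = len(matrix[0])
--     len2 = len(matrix)
--     for i in range(len1):
--         tmpValue = 0
--         for j in range(len2):
--             tmpValue += (vec[j] * matrix[j][i])
--         resVec.append(tmpValue % 2)
--     return  resVec
-- ===== SOURCE B (Python) =====
-- def mulMatAndVec(vec, matrix):
--     res = [0] * len(matrix[0])
--     for j, row in enumerate(matrix):
--         for i in range(len(res)):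
--             res[i] += vec[j] * row[i]
--     return [x % 2 for x in res]
-- ===== Notes on version B (the rewrite author's own statement) =====
-- stated objective: alternative
-- what changed: B builds the whole result vector by row-wise accumulation of partial sums (one in-place update pass per matrix row, then a final mod-2 pass) instead of A's per-column independent inner products with append.
import Mathlib
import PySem

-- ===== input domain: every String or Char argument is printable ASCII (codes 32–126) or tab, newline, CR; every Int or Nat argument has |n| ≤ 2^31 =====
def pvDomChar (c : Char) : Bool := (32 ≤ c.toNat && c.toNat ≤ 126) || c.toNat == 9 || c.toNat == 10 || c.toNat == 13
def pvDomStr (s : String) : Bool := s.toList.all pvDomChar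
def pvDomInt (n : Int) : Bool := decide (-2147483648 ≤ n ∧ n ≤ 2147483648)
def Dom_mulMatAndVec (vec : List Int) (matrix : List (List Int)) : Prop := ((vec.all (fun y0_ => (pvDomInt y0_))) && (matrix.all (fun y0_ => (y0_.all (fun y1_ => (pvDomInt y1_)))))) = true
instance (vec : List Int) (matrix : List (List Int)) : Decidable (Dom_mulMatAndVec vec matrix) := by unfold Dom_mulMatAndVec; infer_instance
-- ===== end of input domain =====

-- B builds the result by row-wise accumulation of partial sums instead of A's per-column inner products; same cost, different decomposition.


-- ===== PORT A =====
def mulMatAndVec (vec : List Int) (matrix : List (List Int)) : List Int :=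
  (PySem.List.pyRange 0 ((PySem.List.pyGetD matrix 0 []).length : Int) 1).foldl (fun resVec i =>
    resVec ++ [PySem.Int.mod
      ((PySem.List.pyRange 0 (matrix.length : Int) 1).foldl (fun t j =>
        t + PySem.List.pyGetD vec j 0 * PySem.List.pyGetD (PySem.List.pyGetD matrix j []) i 0) 0) 2]) []

-- ===== PORT B =====
-- 'for j, row in enumerate(matrix): for i in range(len(res)): res[i] += vec[j] * row[i]'
def pvAccumRows (vec : List Int) (rows : List (List Int)) (j : Nat) (res : List Int) : List Int :=
  match rows with
  | [] => res
  | r :: rs =>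
      pvAccumRows vec rs (j + 1)
        (res.mapIdx (fun i x => x + PySem.List.pyGetD vec (j : Int) 0 * PySem.List.pyGetD r (i : Int) 0))

def mulMatAndVec_alt (vec : List Int) (matrix : List (List Int)) : List Int :=
  (pvAccumRows vec matrix 0 (List.replicate (PySem.List.pyGetD matrix 0 []).length 0)).map
    (fun x => PySem.Int.mod x 2)

-- ===== PRECONDITION & SPEC =====
-- Exactly the inputs on which Python A returns normally (no IndexError): the matrix is
-- nonempty, and either its first row is empty (no index is ever read) or vec covers every
-- row index and every row has at least as many columns as the first row.
def Pre_mulMatAndVec (vec : List Int) (matrix : List (List Int)) : Prop :=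
  matrix ≠ [] ∧
    ((PySem.List.pyGetD matrix 0 []).length = 0 ∨
      (matrix.length ≤ vec.length ∧
        ∀ row ∈ matrix, (PySem.List.pyGetD matrix 0 []).length ≤ row.length))
instance (vec : List Int) (matrix : List (List Int)) : Decidable (Pre_mulMatAndVec vec matrix) := by
  unfold Pre_mulMatAndVec; infer_instance

def pvWitness_mulMatAndVec : List Int × List (List Int) := ([1, 2, 3], [[1, 0], [1, 1], [0, 1]])

def Spec_mulMatAndVec (vec : List Int) (matrix : List (List Int)) (out : List Int) : Prop := out = mulMatAndVec_alt vec matrix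
instance (vec : List Int) (matrix : List (List Int)) (out : List Int) : Decidable (Spec_mulMatAndVec vec matrix out) := by unfold Spec_mulMatAndVec; infer_instance

-- ===== CLAIM (what is proved, stated in full; the proofs are below) =====
def Claim_equal_mulMatAndVec : Prop := ∀ (vec : List Int) (matrix : List (List Int)), Dom_mulMatAndVec vec matrix → Pre_mulMatAndVec vec matrix → Spec_mulMatAndVec vec matrix (mulMatAndVec vec matrix)

-- ===== LEMMAS AND PROOFS =====

-- column sum of vec[j]*rows[j][i] over the remaining rows, j being the absolute row index
def pvRowSum (vec : List Int) (rows : List (List Int)) (j : Nat) (i : Int) : Int :=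
  match rows with
  | [] => 0
  | r :: rs => PySem.List.pyGetD vec (j : Int) 0 * PySem.List.pyGetD r i 0 + pvRowSum vec rs (j + 1) i

theorem pv_mapIdx_map_range (n : Nat) (g : Nat → Int) (F : Nat → Int → Int) :
    ((List.range n).map g).mapIdx F = (List.range n).map (fun i => F i (g i)) := by
  apply List.ext_getElem
  · simp
  · intro k h1 h2
    simp [List.getElem_mapIdx]

theorem pv_accum_spec (vec : List Int) (rows : List (List Int)) :
    ∀ (j : Nat) (n : Nat) (g : Nat → Int),
      pvAccumRows vec rows j ((List.range n).map g)
        = (List.range n).map (fun i => g i + pvRowSum vec rows j (i : Int)) := by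
  induction rows with
  | nil => intro j n g; simp [pvAccumRows, pvRowSum]
  | cons r rs ih =>
      intro j n g
      rw [pvAccumRows, pv_mapIdx_map_range, ih]
      apply List.map_congr_left
      intro k _
      simp [pvRowSum]
      ring

theorem pv_innerA (vec : List Int) (matrix : List (List Int)) (i : Int) :
    ∀ (d : Nat) (a : Nat) (t : Int), matrix.length - a = d →
      (PySem.List.pyRange (a : Int) (matrix.length : Int) 1).foldl
          (fun t j => t + PySem.List.pyGetD vec j 0 * PySem.List.pyGetD (PySem.List.pyGetD matrix j []) i 0) t
        = t + pvRowSum vec (matrix.drop a) a i := by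
  intro d
  induction d with
  | zero =>
      intro a t h
      have ha : matrix.length ≤ a := by omega
      rw [PySem.List.pyRange_one_eq_nil (by exact_mod_cast ha)]
      simp [List.drop_eq_nil_of_le ha, pvRowSum]
  | succ d ih =>
      intro a t h
      have ha : a < matrix.length := by omega
      rw [PySem.List.pyRange_one_cons (by exact_mod_cast ha)]
      simp only [List.foldl_cons]
      have hcast : ((a : Int) + 1) = ((a + 1 : Nat) : Int) := by push_cast; ring
      rw [hcast, ih (a + 1) _ (by omega)]
      have hdrop : matrix.drop a = matrix[a] :: matrix.drop (a + 1) :=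
        List.drop_eq_getElem_cons ha
      rw [hdrop]
      have hget : PySem.List.pyGetD matrix (a : Int) [] = matrix[a] := by
        rw [PySem.List.pyGetD_natCast]; exact List.getD_eq_getElem _ _ ha
      simp [pvRowSum, hget]
      ring

theorem pv_both_eq (vec : List Int) (matrix : List (List Int)) :
    mulMatAndVec vec matrix = mulMatAndVec_alt vec matrix := by
  unfold mulMatAndVec mulMatAndVec_alt
  rw [PySem.List.foldl_append_singleton_eq_map]
  have hinner : ∀ i : Int,
      (PySem.List.pyRange 0 (matrix.length : Int) 1).foldl
        (fun t j => t + PySem.List.pyGetD vec j 0 * PySem.List.pyGetD (PySem.List.pyGetD matrix j []) i 0) 0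
      = pvRowSum vec matrix 0 i := by
    intro i
    have h := pv_innerA vec matrix i matrix.length 0 0 (by omega)
    simpa using h
  simp only [hinner]
  have hrep : (List.replicate (PySem.List.pyGetD matrix 0 []).length (0 : Int))
      = (List.range (PySem.List.pyGetD matrix 0 []).length).map (fun _ => (0 : Int)) := by
    simp
  rw [hrep, pv_accum_spec, PySem.List.pyRange_one, List.map_map, List.map_map]
  apply List.map_congr_left
  intro k hk
  simp

-- ===== VERDICT (by name: the statement is the Claim_ definition above) =====
theorem mulMatAndVec_spec : Claim_equal_mulMatAndVec := by
  intro vec matrix _ _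
  unfold Spec_mulMatAndVec
  exact pv_both_eq vec matrix
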